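-- pv_equiv track=rewrite | github.com/pestopoppa/epyc-root | scripts/utils/compress_tool_output.py | _compress_cargo_test
-- ===== SOURCE A (Python) =====
-- def _compress_cargo_test(text: str, command: str) -> str:
--     """Failure focus for Rust test output."""
--     lines = text.splitlines()
--
--     failure_lines: list[str] = []
--     summary_lines: list[str] = []
--     in_failures = False
--
--     for line in lines:
--         if line.strip() == "failures:":
--             in_failures = True
--             failure_lines.append(line)
--             continue
--         if in_failures and line.startswith("test result:"):
--             in_failures = False
--             summary_lines.append(line)
--             continue
--         if line.startswith("test result:"):
--             summary_lines.append(line)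
--             continue
--         if in_failures:
--             failure_lines.append(line)
--
--     if not failure_lines and not summary_lines:
--         for line in reversed(lines):
--             if line.startswith("test result:"):
--                 return f"[compressed cargo test — {len(lines)} lines]\n{line}"
--         return text
--
--     parts = [f"[compressed cargo test — {len(lines)} lines original]"]
--     if failure_lines:
--         parts.append("\n".join(failure_lines))
--     if summary_lines:
--         parts.append("\n".join(summary_lines))
--     return "\n".join(parts)
-- ===== SOURCE B (Python) =====
-- def _failures_suffix(block):
--     """Suffix of a block starting at its first 'failures:' marker (or [])."""
--     for j, l in enumerate(block):
--         if l.strip() == "failures:":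
--             return block[j:]
--     return []
--
--
-- def _compress_cargo_test(text: str, command: str) -> str:
--     """Failure focus for Rust test output."""
--     lines = text.splitlines()
--
--     # Split the lines into blocks delimited by 'test result:' lines; the
--     # delimiters themselves are exactly the summary lines.
--     summary_lines: list[str] = []
--     blocks: list[list[str]] = []
--     current: list[str] = []
--     for line in lines:
--         if line.startswith("test result:"):
--             summary_lines.append(line)
--             blocks.append(current)
--             current = []
--         else:
--             current.append(line)
--     blocks.append(current)
--
--     # Within a block, the failure lines are exactly the suffix from the first
--     # 'failures:' marker: nothing before it is collected, and only a summary
--     # line (a block boundary) ends collection.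
--     failure_lines = [l for b in blocks for l in _failures_suffix(b)]
--
--     if not failure_lines and not summary_lines:
--         # no 'test result:' line exists at all, so keep the text unchanged
--         return text
--
--     parts = [f"[compressed cargo test — {len(lines)} lines original]"]
--     if failure_lines:
--         parts.append("\n".join(failure_lines))
--     if summary_lines:
--         parts.append("\n".join(summary_lines))
--     return "\n".join(parts)
-- ===== Notes on version B (the rewrite author's own statement) =====
-- stated objective: alternative
-- what changed: Instead of A's single stateful scan with an in_failures flag, B splits the lines into blocks delimited by the 'test result:' lines (the delimiters are the summary lines) and extracts from each block the suffix starting at its first 'failures:' marker; A's unreachable reversed fallback search is removed.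
import Mathlib
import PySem

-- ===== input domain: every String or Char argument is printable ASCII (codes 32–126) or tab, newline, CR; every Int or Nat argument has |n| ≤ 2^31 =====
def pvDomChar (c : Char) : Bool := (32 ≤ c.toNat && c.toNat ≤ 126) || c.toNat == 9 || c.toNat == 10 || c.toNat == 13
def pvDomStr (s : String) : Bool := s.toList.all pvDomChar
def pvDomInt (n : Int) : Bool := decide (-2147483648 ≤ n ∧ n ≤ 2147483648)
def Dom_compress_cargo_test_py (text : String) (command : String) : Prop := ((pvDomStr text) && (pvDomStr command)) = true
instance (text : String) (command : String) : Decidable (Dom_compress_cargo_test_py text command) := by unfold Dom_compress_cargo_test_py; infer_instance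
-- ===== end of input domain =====

-- B splits the lines into blocks delimited by 'test result:' lines (the delimiters being the
-- summary lines) and takes per block the suffix from its first 'failures:' marker, instead of
-- A's single stateful flag-driven scan; A's dead reversed fallback search is removed. Objective: alternative.


-- ===== PORT A =====
-- one iteration of A's for-loop; state = (failure_lines, summary_lines, in_failures)
def pvStepA (s : List String × List String × Bool) (line : String) : List String × List String × Bool :=
  if PySem.Str.strip line == "failures:" then (s.1 ++ [line], s.2.1, true)
  else if s.2.2 && PySem.Str.startswith line "test result:" then (s.1, s.2.1 ++ [line], false)
  else if PySem.Str.startswith line "test result:" then (s.1, s.2.1 ++ [line], s.2.2)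
  else if s.2.2 then (s.1 ++ [line], s.2.1, s.2.2)
  else s

-- A's fallback: 'for line in reversed(lines): if line.startswith("test result:"): return line'
def pvFindA : List String → Option String
  | [] => none
  | l :: rest => if PySem.Str.startswith l "test result:" then some l else pvFindA rest

def compress_cargo_test_py (text : String) (command : String) : String :=
  let lines := PySem.Str.splitlines text
  let st := lines.foldl pvStepA ([], [], false)
  let failure_lines := st.1
  let summary_lines := st.2.1
  if failure_lines.isEmpty && summary_lines.isEmpty then
    match pvFindA lines.reverse with
    | some line =>
        "[compressed cargo test — " ++ PySem.Int.toStr (lines.length : Int) ++ " lines]\n" ++ line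
    | none => text
  else
    let parts := ["[compressed cargo test — " ++ PySem.Int.toStr (lines.length : Int) ++ " lines original]"]
    let parts := if !failure_lines.isEmpty then parts ++ [PySem.Str.join "\n" failure_lines] else parts
    let parts := if !summary_lines.isEmpty then parts ++ [PySem.Str.join "\n" summary_lines] else parts
    PySem.Str.join "\n" parts

-- ===== PORT B =====
-- B helper: suffix of a block from its first 'failures:' marker ('block[j:]' at the first hit)
def pvFailSuffix : List String → List String
  | [] => []
  | l :: rest => if PySem.Str.strip l == "failures:" then l :: rest else pvFailSuffix rest

-- one iteration of B's splitting loop; state = (summary_lines, blocks, current)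
def pvSplitStep (s : List String × List (List String) × List String) (line : String) :
    List String × List (List String) × List String :=
  if PySem.Str.startswith line "test result:" then (s.1 ++ [line], s.2.1 ++ [s.2.2], [])
  else (s.1, s.2.1, s.2.2 ++ [line])

def compress_cargo_test_py_alt (text : String) (command : String) : String :=
  let lines := PySem.Str.splitlines text
  let st := lines.foldl pvSplitStep ([], [], [])
  let summary_lines := st.1
  let blocks := st.2.1 ++ [st.2.2]
  let failure_lines := blocks.flatMap pvFailSuffix
  if failure_lines.isEmpty && summary_lines.isEmpty then text
  else
    let parts := ["[compressed cargo test — " ++ PySem.Int.toStr (lines.length : Int) ++ " lines original]"]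
    let parts := if !failure_lines.isEmpty then parts ++ [PySem.Str.join "\n" failure_lines] else parts
    let parts := if !summary_lines.isEmpty then parts ++ [PySem.Str.join "\n" summary_lines] else parts
    PySem.Str.join "\n" parts

-- ===== PRECONDITION & SPEC =====
def Spec_compress_cargo_test_py (text : String) (command : String) (out : String) : Prop := out = compress_cargo_test_py_alt text command
instance (text : String) (command : String) (out : String) : Decidable (Spec_compress_cargo_test_py text command out) := by unfold Spec_compress_cargo_test_py; infer_instance

-- ===== CLAIM (what is proved, stated in full; the proofs are below) =====
def Claim_equal_compress_cargo_test_py : Prop := ∀ (text : String) (command : String), Dom_compress_cargo_test_py text command → Spec_compress_cargo_test_py text command (compress_cargo_test_py text command)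

-- ===== LEMMAS AND PROOFS =====

-- a line that starts with "test result:" cannot strip to "failures:" (its head is 't', not whitespace)
lemma pv_strip_ne (line : String)
    (h : PySem.Str.startswith line "test result:" = true) :
    (PySem.Str.strip line == "failures:") = false := by
  rw [beq_eq_false_iff_ne]
  intro hs
  have hpre : ("test result:".toList) <+: line.toList :=
    (PySem.Chars.startswith_iff line.toList "test result:".toList).mp (by simpa using h)
  obtain ⟨u, hu⟩ := hpre
  have hl : line.toList = 't' :: ("est result:".toList ++ u) := by rw [← hu]; rfl
  generalize "est result:".toList ++ u = cs at hl
  have hstrip : PySem.Chars.strip line.toList = 'f' :: "ailures:".toList := by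
    have : (PySem.Str.strip line).toList = "failures:".toList := by rw [hs]
    simpa [PySem.Str.strip] using this
  rw [hl] at hstrip
  have hdrop : PySem.Chars.lstrip ('t' :: cs) = 't' :: cs := by
    simp [PySem.Chars.lstrip, show PySem.Chars.isspace 't' = false from by decide]
  rw [PySem.Chars.strip, hdrop, PySem.Chars.rstrip] at hstrip
  have hsuf : List.dropWhile PySem.Chars.isspace ('t' :: cs).reverse <:+ ('t' :: cs).reverse :=
    List.dropWhile_suffix _
  have hpref : (List.dropWhile PySem.Chars.isspace ('t' :: cs).reverse).reverse <+: ('t' :: cs) := by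
    have h2 := List.reverse_prefix.mpr hsuf
    simpa using h2
  rw [hstrip] at hpref
  obtain ⟨v, hv⟩ := hpref
  simp at hv

-- recursive view of A's loop
def pvScan : List String → Bool → List String × List String × Bool
  | [], b => ([], [], b)
  | l :: rest, b =>
    if PySem.Str.strip l == "failures:" then
      let r := pvScan rest true; (l :: r.1, r.2.1, r.2.2)
    else if PySem.Str.startswith l "test result:" then
      let r := pvScan rest false; (r.1, l :: r.2.1, r.2.2)
    else if b then
      let r := pvScan rest true; (l :: r.1, r.2.1, r.2.2)
    else pvScan rest false

lemma pv_foldA_eq (L : List String) (fa su : List String) (b : Bool) :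
    L.foldl pvStepA (fa, su, b) =
      (fa ++ (pvScan L b).1, su ++ (pvScan L b).2.1, (pvScan L b).2.2) := by
  induction L generalizing fa su b with
  | nil => simp [pvScan]
  | cons l rest ih =>
    simp only [List.foldl_cons, pvScan]
    by_cases h1 : (PySem.Str.strip l == "failures:") = true
    · simp only [pvStepA, h1, if_true, ih]
      simp
    · by_cases h2 : PySem.Str.startswith l "test result:" = true
      · cases b with
        | true =>
          simp only [pvStepA, h1, h2, if_false, ih]
          simp [List.append_assoc]
        | false =>
          simp only [pvStepA, h1, h2, if_false, ih]
          simp [List.append_assoc]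
      · cases b with
        | true =>
          simp only [pvStepA, h1, h2, if_false, ih]
          simp
        | false =>
          simp only [pvStepA, h1, h2, if_false, ih]
          simp

-- recursive view of B's splitting loop: (summaries, first block, remaining blocks)
def pvSplit : List String → List String × List String × List (List String)
  | [] => ([], [], [])
  | l :: rest =>
    let r := pvSplit rest
    if PySem.Str.startswith l "test result:" then (l :: r.1, [], r.2.1 :: r.2.2)
    else (r.1, l :: r.2.1, r.2.2)

lemma pv_foldB_eq (L : List String) (su : List String) (dg : List (List String)) (cur : List String) :
    (L.foldl pvSplitStep (su, dg, cur)).1 = su ++ (pvSplit L).1 ∧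
    (L.foldl pvSplitStep (su, dg, cur)).2.1 ++ [(L.foldl pvSplitStep (su, dg, cur)).2.2]
      = dg ++ ((cur ++ (pvSplit L).2.1) :: (pvSplit L).2.2) := by
  induction L generalizing su dg cur with
  | nil => simp [pvSplit]
  | cons l rest ih =>
    rcases Bool.eq_false_or_eq_true (PySem.Str.startswith l "test result:") with h | h
    · have hstep : pvSplitStep (su, dg, cur) l = (su ++ [l], dg ++ [cur], []) := by
        simp [pvSplitStep, PySem.Str.startswith] at h ⊢; simp [h]
      have hsplit : pvSplit (l :: rest)
          = (l :: (pvSplit rest).1, [], (pvSplit rest).2.1 :: (pvSplit rest).2.2) := by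
        simp [pvSplit, PySem.Str.startswith] at h ⊢; simp [h]
      obtain ⟨i1, i2⟩ := ih (su ++ [l]) (dg ++ [cur]) []
      rw [List.foldl_cons, hstep, hsplit]
      exact ⟨by rw [i1]; simp, by rw [i2]; simp⟩
    · have hstep : pvSplitStep (su, dg, cur) l = (su, dg, cur ++ [l]) := by
        simp [pvSplitStep, PySem.Str.startswith] at h ⊢; simp [h]
      have hsplit : pvSplit (l :: rest)
          = ((pvSplit rest).1, l :: (pvSplit rest).2.1, (pvSplit rest).2.2) := by
        simp [pvSplit, PySem.Str.startswith] at h ⊢; simp [h]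
      obtain ⟨i1, i2⟩ := ih su dg (cur ++ [l])
      rw [List.foldl_cons, hstep, hsplit]
      exact ⟨by rw [i1], by rw [i2]; simp⟩

-- the scan's outputs in terms of the split: failures = per-block suffixes, summaries = delimiters
lemma pv_key (L : List String) :
    ((pvScan L false).1 = pvFailSuffix (pvSplit L).2.1 ++ (pvSplit L).2.2.flatMap pvFailSuffix ∧
     (pvScan L false).2.1 = (pvSplit L).1) ∧
    ((pvScan L true).1 = (pvSplit L).2.1 ++ (pvSplit L).2.2.flatMap pvFailSuffix ∧
     (pvScan L true).2.1 = (pvSplit L).1) := by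
  induction L with
  | nil => simp [pvScan, pvSplit, pvFailSuffix]
  | cons l rest ih =>
    obtain ⟨⟨f1, s1⟩, ⟨f2, s2⟩⟩ := ih
    by_cases h1 : (PySem.Str.strip l == "failures:") = true
    · have h2 : PySem.Str.startswith l "test result:" = false := by
        by_contra hc
        have := pv_strip_ne l (by simpa using hc)
        rw [h1] at this; exact absurd this (by simp)
      simp only [pvScan, pvSplit, h1, h2, if_true, if_false, Bool.false_eq_true]
      refine ⟨⟨?_, by simpa using s2⟩, ⟨?_, by simpa using s2⟩⟩ <;>
        simp [pvFailSuffix, h1, f2]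
    · by_cases h2 : PySem.Str.startswith l "test result:" = true
      · simp only [pvScan, pvSplit, h1, h2, if_true, if_false]
        refine ⟨⟨?_, by simpa using s1⟩, ⟨?_, by simpa using s1⟩⟩ <;>
          simp [pvFailSuffix, f1]
      · simp only [pvScan, pvSplit, h1, h2, if_false, Bool.false_eq_true]
        refine ⟨⟨?_, by simpa using s1⟩, ⟨?_, by simpa using s2⟩⟩ <;>
          simp [pvFailSuffix, h1, f1, f2]

-- the split's summaries are exactly the 'test result:' lines
lemma pv_split_summary (L : List String) :
    (pvSplit L).1 = L.filter (fun l => PySem.Str.startswith l "test result:") := by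
  induction L with
  | nil => rfl
  | cons l rest ih =>
    rcases Bool.eq_false_or_eq_true (PySem.Str.startswith l "test result:") with h | h <;>
      simp only [pvSplit, List.filter_cons, h, Bool.false_eq_true, if_false, if_true, ih]

lemma pv_findA_none (l : List String)
    (h : ∀ x ∈ l, PySem.Str.startswith x "test result:" = false) :
    pvFindA l = none := by
  induction l with
  | nil => rfl
  | cons x rest ih =>
    simp only [pvFindA, h x (by simp)]
    exact ih (fun y hy => h y (by simp [hy]))

-- ===== VERDICT (by name: the statement is the Claim_ definition above) =====
theorem compress_cargo_test_py_spec : Claim_equal_compress_cargo_test_py := by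
  intro text command _
  unfold Spec_compress_cargo_test_py
  simp only [compress_cargo_test_py, compress_cargo_test_py_alt]
  set L := PySem.Str.splitlines text with hL
  obtain ⟨b1, b2⟩ := pv_foldB_eq L [] [] []
  obtain ⟨⟨kf, ks⟩, -⟩ := pv_key L
  rw [pv_foldA_eq]
  dsimp only
  rw [List.nil_append, List.nil_append, kf, ks, b1, b2]
  simp only [List.nil_append, List.flatMap_cons]
  split_ifs with hb
  · have hsu : ((pvSplit L).1).isEmpty = true := ((Bool.and_eq_true _ _).mp hb).2
    have hnone : pvFindA L.reverse = none := by
      apply pv_findA_none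
      intro x hx
      by_contra hc
      have hx2 : x ∈ L := List.mem_reverse.mp hx
      have hmem : x ∈ (pvSplit L).1 := by
        rw [pv_split_summary]
        exact List.mem_filter.mpr ⟨hx2, by simpa using hc⟩
      rw [List.isEmpty_iff.mp hsu] at hmem
      simp at hmem
    rw [hnone]
  all_goals rfl
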